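-- pv_equiv track=rewrite | github.com/6210qwe/leetcode_py | leetcode_solutions/by_id/q4143.py | solution_function_name
-- ===== SOURCE A (Python) =====
-- from typing import List, Optional
--
-- def solution_function_name(nums: List[int], target1: int, target2: int) -> int:
--     MOD = 10**9 + 7
--     n = len(nums)
--     prefix_xor = [0] * (n + 1)
--     for i in range(n):
--         prefix_xor[i + 1] = prefix_xor[i] ^ nums[i]
--
--     dp1 = [0] * (n + 1)
--     dp2 = [0] * (n + 1)
--     dp1[0] = 1
--
--     for i in range(1, n + 1):
--         for j in range(i):
--             if prefix_xor[i] ^ prefix_xor[j] == target1: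
--                 dp1[i] = (dp1[i] + dp2[j]) % MOD
--             elif prefix_xor[i] ^ prefix_xor[j] == target2:
--                 dp2[i] = (dp2[i] + dp1[j]) % MOD
--
--     return dp1[n]
-- ===== SOURCE B (Python) =====
-- from typing import List
--
-- def solution_function_name(nums: List[int], target1: int, target2: int) -> int:
--     # O(n): hash maps from prefix-xor value to running (mod) sums of dp1/dp2.
--     MOD = 10**9 + 7
--     x = 0
--     s1 = {0: 1}   # sum of dp1[j] over prefixes j seen so far, keyed by their prefix-xor
--     s2 = {}       # same for dp2
--     d1 = 1        # dp1 of the current prefix (empty prefix: 1)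
--     for v in nums:
--         x ^= v
--         d1 = s2.get(x ^ target1, 0)
--         d2 = 0 if target1 == target2 else s1.get(x ^ target2, 0)
--         s1[x] = (s1.get(x, 0) + d1) % MOD
--         s2[x] = (s2.get(x, 0) + d2) % MOD
--     return d1
-- ===== Notes on version B (the rewrite author's own statement) =====
-- stated objective: faster
-- what changed: Replaced the O(n^2) scan over all prefix-pair indices (j<i) by a single left-to-right pass that maintains dictionaries mapping each prefix-xor value to the running mod-sums of dp1/dp2, so each dp value is one hash lookup; the target1==target2 tie (where A's elif never fires) is handled explicitly.
import Mathlib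
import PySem

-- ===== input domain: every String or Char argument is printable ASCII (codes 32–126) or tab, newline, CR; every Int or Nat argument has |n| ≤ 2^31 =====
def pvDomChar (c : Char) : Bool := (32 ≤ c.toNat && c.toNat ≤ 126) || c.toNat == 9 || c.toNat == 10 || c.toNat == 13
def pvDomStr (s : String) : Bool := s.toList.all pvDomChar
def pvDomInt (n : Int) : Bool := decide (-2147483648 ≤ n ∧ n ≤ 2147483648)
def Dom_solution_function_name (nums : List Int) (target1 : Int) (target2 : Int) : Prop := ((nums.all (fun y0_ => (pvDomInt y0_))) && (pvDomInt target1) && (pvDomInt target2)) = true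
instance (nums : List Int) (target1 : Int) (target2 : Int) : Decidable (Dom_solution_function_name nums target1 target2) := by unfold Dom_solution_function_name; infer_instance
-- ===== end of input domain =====

-- B replaces A's O(n^2) double loop over all prefix pairs by a single pass that keeps
-- hash maps from prefix-xor value to the running (mod) sums of dp1/dp2.


-- ===== PORT A =====
def solution_function_name (nums : List Int) (target1 : Int) (target2 : Int) : Int :=
  let MOD : Int := 1000000007
  let n := nums.length
  let prefix_xor : List Int :=
    (List.range n).foldl
      (fun px i => px.set (i + 1) (PySem.Int.bxor (px.getD i 0) (nums.getD i 0)))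
      (List.replicate (n + 1) 0)
  let dp1 : List Int := (List.replicate (n + 1) (0 : Int)).set 0 1
  let dp2 : List Int := List.replicate (n + 1) (0 : Int)
  let st :=
    (List.range' 1 n).foldl
      (fun (st : List Int × List Int) i =>
        (List.range i).foldl
          (fun (st : List Int × List Int) j =>
            if PySem.Int.bxor (prefix_xor.getD i 0) (prefix_xor.getD j 0) == target1 then
              (st.1.set i ((st.1.getD i 0 + st.2.getD j 0) % MOD), st.2)
            else if PySem.Int.bxor (prefix_xor.getD i 0) (prefix_xor.getD j 0) == target2 then
              (st.1, st.2.set i ((st.2.getD i 0 + st.1.getD j 0) % MOD))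
            else st)
          st)
      (dp1, dp2)
  st.1.getD n 0

-- ===== PORT B =====
def solution_function_name_alt (nums : List Int) (target1 : Int) (target2 : Int) : Int :=
  let MOD : Int := 1000000007
  let st :=
    nums.foldl
      (fun (st : Int × PySem.Dict Int Int × PySem.Dict Int Int × Int) v =>
        let x := PySem.Int.bxor st.1 v
        let s1 := st.2.1
        let s2 := st.2.2.1
        let d1 := s2.getD (PySem.Int.bxor x target1) 0
        let d2 := if target1 == target2 then 0 else s1.getD (PySem.Int.bxor x target2) 0
        (x, s1.insert x ((s1.getD x 0 + d1) % MOD), s2.insert x ((s2.getD x 0 + d2) % MOD), d1))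
      (0, PySem.Dict.ofList [(0, 1)], PySem.Dict.empty, 1)
  st.2.2.2

-- ===== PRECONDITION & SPEC =====
def Spec_solution_function_name (nums : List Int) (target1 : Int) (target2 : Int) (out : Int) : Prop := out = solution_function_name_alt nums target1 target2
instance (nums : List Int) (target1 : Int) (target2 : Int) (out : Int) : Decidable (Spec_solution_function_name nums target1 target2 out) := by unfold Spec_solution_function_name; infer_instance

-- ===== CLAIM (what is proved, stated in full; the proofs are below) =====
def Claim_equal_solution_function_name : Prop := ∀ (nums : List Int) (target1 : Int) (target2 : Int), Dom_solution_function_name nums target1 target2 → Spec_solution_function_name nums target1 target2 (solution_function_name nums target1 target2)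

-- ===== LEMMAS AND PROOFS =====
def pvM : Int := 1000000007
theorem pv_bxor_cancel (a b : Int) : PySem.Int.bxor a (PySem.Int.bxor a b) = b := by
  unfold PySem.Int.bxor
  rcases le_or_gt 0 a with ha | ha <;> rcases le_or_gt 0 b with hb | hb <;>
    simp [ha, hb, not_le_of_gt] <;> omega

theorem pv_bxor_eq_iff (a b c : Int) : PySem.Int.bxor a b = c ↔ b = PySem.Int.bxor a c := by
  constructor <;> rintro rfl <;> rw [pv_bxor_cancel]

def pvPx (nums : List Int) (i : Nat) : Int := (nums.take i).foldl PySem.Int.bxor 0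
def pvSumIf (l : List Nat) (c : Nat → Bool) (f : Nat → Int) : Int :=
  (l.map (fun j => if c j then f j else 0)).sum

theorem pvPx_succ (nums : List Int) (k : Nat) (h : k < nums.length) :
    pvPx nums (k+1) = PySem.Int.bxor (pvPx nums k) (nums.getD k 0) := by
  have ht : nums.take (k+1) = nums.take k ++ [nums[k]] := by
    rw [List.take_succ]; simp [List.getElem?_eq_getElem h]
  have hg : nums.getD k 0 = nums[k] := by
    simp [List.getD_eq_getElem?_getD, List.getElem?_eq_getElem h]
  rw [pvPx, pvPx, ht, List.foldl_append, hg]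
  simp

theorem pvSumIf_cons (h : Nat) (t : List Nat) (c : Nat → Bool) (f : Nat → Int) :
    pvSumIf (h :: t) c f = (if c h then f h else 0) + pvSumIf t c f := by
  simp [pvSumIf]

theorem pvSumIf_congr (l : List Nat) (c c' : Nat → Bool) (f : Nat → Int)
    (h : ∀ j ∈ l, c j = c' j) : pvSumIf l c f = pvSumIf l c' f := by
  unfold pvSumIf
  rw [List.map_congr_left]
  intro j hj; rw [h j hj]

theorem pvSumIf_congr_f (l : List Nat) (c : Nat → Bool) (f f' : Nat → Int)
    (h : ∀ j ∈ l, c j = true → f j = f' j) : pvSumIf l c f = pvSumIf l c f' := by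
  unfold pvSumIf
  rw [List.map_congr_left]
  intro j hj
  by_cases hc : c j <;> simp [hc, h j hj]

theorem pvSumIf_zero (l : List Nat) (c : Nat → Bool) (f : Nat → Int)
    (h : ∀ j ∈ l, c j = false) : pvSumIf l c f = 0 := by
  unfold pvSumIf
  rw [List.sum_eq_zero]
  intro x hx
  simp only [List.mem_map] at hx
  obtain ⟨j, hj, rfl⟩ := hx
  simp [h j hj]

theorem pvSumIf_append (l l' : List Nat) (c : Nat → Bool) (f : Nat → Int) :
    pvSumIf (l ++ l') c f = pvSumIf l c f + pvSumIf l' c f := by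
  unfold pvSumIf; simp

theorem pv_foldl_mod (c : Nat → Bool) (f : Nat → Int) :
    ∀ (l : List Nat) (a : Int),
      l.foldl (fun a j => if c j then (a + f j) % pvM else a) a =
        if l.any c then (a + pvSumIf l c f) % pvM else a := by
  intro l
  induction l with
  | nil => simp [pvSumIf]
  | cons h t ih =>
    intro a
    simp only [List.foldl_cons, List.any_cons, pvSumIf_cons]
    by_cases hc : c h
    · rw [if_pos hc, ih, hc]
      simp only [Bool.true_or, if_pos]
      rcases Bool.eq_false_or_eq_true (t.any c) with ht | ht
      · rw [ht, if_pos rfl]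
        unfold pvM; omega
      · rw [ht, if_neg (by simp), pvSumIf_zero t c f (fun j hj => by simpa using List.any_eq_false.mp ht j hj)]
        ring_nf
    · rw [if_neg hc, ih, (by simpa using hc : c h = false)]
      simp only [Bool.false_or, if_neg hc]
      simp

theorem pv_foldl_mod_zero (c : Nat → Bool) (f : Nat → Int) (l : List Nat) :
    l.foldl (fun a j => if c j then (a + f j) % pvM else a) 0 = pvSumIf l c f % pvM := by
  rw [pv_foldl_mod]
  rcases Bool.eq_false_or_eq_true (l.any c) with h | h
  · rw [h, if_pos rfl, zero_add]
  · rw [h, if_neg (by simp), pvSumIf_zero l c f (fun j hj => by simpa using List.any_eq_false.mp h j hj)]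
    decide

def pvDpl (nums : List Int) (t1 t2 : Int) : Nat → List (Int × Int)
  | 0 => [(1, 0)]
  | k+1 =>
    let p := pvDpl nums t1 t2 k
    let x := pvPx nums (k+1)
    p ++ [((pvSumIf (List.range (k+1)) (fun j => pvPx nums j == PySem.Int.bxor x t1)
              (fun j => (p.getD j (0,0)).2)) % pvM,
           (pvSumIf (List.range (k+1))
              (fun j => !(pvPx nums j == PySem.Int.bxor x t1) && (pvPx nums j == PySem.Int.bxor x t2))
              (fun j => (p.getD j (0,0)).1)) % pvM)]

theorem pvDpl_length (nums : List Int) (t1 t2 : Int) (k : Nat) :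
    (pvDpl nums t1 t2 k).length = k + 1 := by
  induction k with
  | zero => rfl
  | succ k ih => simp [pvDpl, ih]

theorem pvDpl_getD_le (nums : List Int) (t1 t2 : Int) (k j : Nat) (hj : j ≤ k) :
    (pvDpl nums t1 t2 (k+1)).getD j (0,0) = (pvDpl nums t1 t2 k).getD j (0,0) := by
  have hl : j < (pvDpl nums t1 t2 k).length := by rw [pvDpl_length]; omega
  rw [pvDpl]
  simp only [List.getD_eq_getElem?_getD, List.getElem?_append_left hl]

theorem pvDpl_getD_last (nums : List Int) (t1 t2 : Int) (k : Nat) :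
    (pvDpl nums t1 t2 (k+1)).getD (k+1) (0,0) =
      ((pvSumIf (List.range (k+1))
          (fun j => pvPx nums j == PySem.Int.bxor (pvPx nums (k+1)) t1)
          (fun j => ((pvDpl nums t1 t2 k).getD j (0,0)).2)) % pvM,
       (pvSumIf (List.range (k+1))
          (fun j => !(pvPx nums j == PySem.Int.bxor (pvPx nums (k+1)) t1) &&
                    (pvPx nums j == PySem.Int.bxor (pvPx nums (k+1)) t2))
          (fun j => ((pvDpl nums t1 t2 k).getD j (0,0)).1)) % pvM) := by
  have hl : (pvDpl nums t1 t2 k).length = k + 1 := pvDpl_length ..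
  rw [pvDpl]
  simp only [List.getD_eq_getElem?_getD]
  rw [List.getElem?_append_right (by omega)]
  simp [hl]

theorem pv_getD_set_ne {α : Type} [Inhabited α] (l : List α) (i j : Nat) (a d : α) (h : j ≠ i) :
    (l.set i a).getD j d = l.getD j d := by
  simp [List.getD_eq_getElem?_getD, List.getElem?_set_ne (by omega : i ≠ j)]

theorem pv_getD_set_self {α : Type} [Inhabited α] (l : List α) (i : Nat) (a d : α) (h : i < l.length) :
    (l.set i a).getD i d = a := by
  simp [List.getD_eq_getElem?_getD, h]

theorem pv_prefix_fold (nums : List Int) :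
    ∀ k, k ≤ nums.length →
      (List.range k).foldl
        (fun px i => px.set (i + 1) (PySem.Int.bxor (px.getD i 0) (nums.getD i 0)))
        (List.replicate (nums.length + 1) 0) =
      (List.range (nums.length + 1)).map (fun i => if i ≤ k then pvPx nums i else 0) := by
  intro k
  induction k with
  | zero =>
    intro _
    apply List.ext_getElem (by simp)
    intro i h1 h2
    simp only [List.range_zero, List.foldl_nil, List.getElem_replicate, List.getElem_map,
      List.getElem_range]
    simp only [List.length_map, List.length_range] at h2
    rcases Nat.eq_zero_or_pos i with rfl | hi
    · simp [pvPx]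
    · rw [if_neg (by omega)]
  | succ k ih =>
    intro hk
    rw [List.range_succ, List.foldl_append, ih (by omega), List.foldl_cons, List.foldl_nil]
    have hgd : ((List.range (nums.length + 1)).map
        (fun i => if i ≤ k then pvPx nums i else 0)).getD k 0 = pvPx nums k := by
      rw [PySem.List.getD_map_range (h := by omega)]
      simp
    rw [hgd]
    apply List.ext_getElem (by simp)
    intro i h1 h2
    simp only [List.length_map, List.length_range] at h2
    simp only [List.getElem_set, List.getElem_map, List.getElem_range]
    rcases Nat.decEq (k+1) i with h | h
    · rw [if_neg h, if_congr (Iff.rfl) rfl rfl]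
      by_cases hik : i ≤ k
      · rw [if_pos hik, if_pos (by omega)]
      · rw [if_neg hik, if_neg (by omega)]
    · rw [if_pos h, ← h, if_pos (by omega), ← pvPx_succ nums k (by omega)]

theorem pv_inner_fold (c1 c2 : Nat → Bool) (g1 g2 : Nat → Int) (i : Nat)
    (l1 l2 : List Int) (hi1 : i < l1.length) (hi2 : i < l2.length)
    (hg1 : ∀ j, j ≠ i → g1 j = l2.getD j 0) (hg2 : ∀ j, j ≠ i → g2 j = l1.getD j 0) :
    ∀ (l : List Nat), (∀ j ∈ l, j ≠ i) → ∀ (a b : Int),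
      l.foldl
        (fun (st : List Int × List Int) j =>
          if c1 j then (st.1.set i ((st.1.getD i 0 + st.2.getD j 0) % pvM), st.2)
          else if c2 j then (st.1, st.2.set i ((st.2.getD i 0 + st.1.getD j 0) % pvM))
          else st)
        (l1.set i a, l2.set i b) =
      (l1.set i (l.foldl (fun a j => if c1 j then (a + g1 j) % pvM else a) a),
       l2.set i (l.foldl (fun b j => if !c1 j && c2 j then (b + g2 j) % pvM else b) b)) := by
  intro l
  induction l with
  | nil => intro _ a b; simp
  | cons h t ih =>
    intro hne a b
    have hhi : h ≠ i := hne h (by simp)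
    simp only [List.foldl_cons]
    by_cases h1 : c1 h
    · rw [if_pos h1, if_pos h1, if_neg (by simp [h1])]
      rw [pv_getD_set_self l1 i a 0 hi1, pv_getD_set_ne l2 i h b 0 hhi, List.set_set,
        ← hg1 h hhi]
      exact ih (fun j hj => hne j (by simp [hj])) _ _
    · rw [if_neg h1, if_neg h1]
      by_cases h2 : c2 h
      · rw [if_pos h2, if_pos (by simp [h1, h2])]
        rw [pv_getD_set_self l2 i b 0 hi2, pv_getD_set_ne l1 i h a 0 hhi, List.set_set,
          ← hg2 h hhi]
        exact ih (fun j hj => hne j (by simp [hj])) _ _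
      · rw [if_neg h2, if_neg (by simp [h2])]
        exact ih (fun j hj => hne j (by simp [hj])) _ _

theorem pv_set_getD_self {α : Type} [Inhabited α] (l : List α) (i : Nat) :
    l.set i (l.getD i default) = l := by
  apply List.ext_getElem (by simp)
  intro idx h1 h2
  simp only [List.getElem_set]
  split
  · next h => subst h; simp [List.getD_eq_getElem?_getD, List.getElem?_eq_getElem h2]
  · rfl


def pvArr (nums : List Int) (t1 t2 : Int) (k : Nat) (sel : Int × Int → Int) : List Int :=
  (List.range (nums.length + 1)).map
    (fun j => if j ≤ k then sel ((pvDpl nums t1 t2 k).getD j (0,0)) else 0)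

theorem pv_range'_concat (k : Nat) : List.range' 1 (k+1) = List.range' 1 k ++ [k+1] := by
  have := List.range'_concat (s := 1) (n := k) (step := 1)
  simpa [Nat.add_comm] using this

theorem pv_outerA (nums : List Int) (t1 t2 : Int) (px : List Int)
    (hpx : px = (List.range (nums.length + 1)).map
        (fun i => if i ≤ nums.length then pvPx nums i else 0)) :
    ∀ k, k ≤ nums.length →
      (List.range' 1 k).foldl
        (fun (st : List Int × List Int) i =>
          (List.range i).foldl
            (fun (st : List Int × List Int) j =>
              if PySem.Int.bxor (px.getD i 0) (px.getD j 0) == t1 then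
                (st.1.set i ((st.1.getD i 0 + st.2.getD j 0) % pvM), st.2)
              else if PySem.Int.bxor (px.getD i 0) (px.getD j 0) == t2 then
                (st.1, st.2.set i ((st.2.getD i 0 + st.1.getD j 0) % pvM))
              else st)
            st)
        ((List.replicate (nums.length + 1) (0 : Int)).set 0 1,
         List.replicate (nums.length + 1) (0 : Int)) =
      (pvArr nums t1 t2 k (·.1), pvArr nums t1 t2 k (·.2)) := by
  have hpxd : ∀ i, i ≤ nums.length → px.getD i 0 = pvPx nums i := by
    intro i hi
    rw [hpx, PySem.List.getD_map_range (h := by omega), if_pos hi]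
  intro k
  induction k with
  | zero =>
    intro _
    simp only [show List.range' 1 0 = [] from rfl, List.foldl_nil]
    refine Prod.ext ?_ ?_ <;>
    · show _ = pvArr nums t1 t2 0 _
      apply List.ext_getElem (by simp [pvArr])
      intro idx h1 h2
      simp only [pvArr, List.getElem_map, List.getElem_range, List.getElem_set,
        List.getElem_replicate, pvDpl]
      rcases Nat.eq_zero_or_pos idx with rfl | hidx
      · simp
      · simp only [if_neg (by omega : ¬ 0 = idx), if_neg (by omega : ¬ idx ≤ 0)]
  | succ k ih =>
    intro hk
    rw [pv_range'_concat, List.foldl_append, ih (by omega), List.foldl_cons, List.foldl_nil]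
    -- lengths of the running arrays
    have hlen1 : (pvArr nums t1 t2 k (·.1)).length = nums.length + 1 := by simp [pvArr]
    have hlen2 : (pvArr nums t1 t2 k (·.2)).length = nums.length + 1 := by simp [pvArr]
    have hi1 : k + 1 < (pvArr nums t1 t2 k (·.1)).length := by omega
    have hi2 : k + 1 < (pvArr nums t1 t2 k (·.2)).length := by omega
    -- present the initial state as set i 0
    have h01 : pvArr nums t1 t2 k (·.1) = (pvArr nums t1 t2 k (·.1)).set (k+1) 0 := by
      have h := pv_set_getD_self (pvArr nums t1 t2 k (·.1)) (k+1)
      rw [show ((pvArr nums t1 t2 k (·.1)).getD (k+1) default) = 0 by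
        simp only [pvArr]
        rw [PySem.List.getD_map_range (h := by omega)]
        · rw [if_neg (by omega)]] at h
      exact h.symm
    have h02 : pvArr nums t1 t2 k (·.2) = (pvArr nums t1 t2 k (·.2)).set (k+1) 0 := by
      have h := pv_set_getD_self (pvArr nums t1 t2 k (·.2)) (k+1)
      rw [show ((pvArr nums t1 t2 k (·.2)).getD (k+1) default) = 0 by
        simp only [pvArr]
        rw [PySem.List.getD_map_range (h := by omega)]
        · rw [if_neg (by omega)]] at h
      exact h.symm
    conv_lhs => rw [h01, h02]
    rw [pv_inner_fold
      (fun j => PySem.Int.bxor (px.getD (k+1) 0) (px.getD j 0) == t1)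
      (fun j => PySem.Int.bxor (px.getD (k+1) 0) (px.getD j 0) == t2)
      (fun j => (pvArr nums t1 t2 k (·.2)).getD j 0)
      (fun j => (pvArr nums t1 t2 k (·.1)).getD j 0)
      (k+1) _ _ hi1 hi2 (fun _ _ => rfl) (fun _ _ => rfl)
      (List.range (k+1)) (by intro j hj; simp at hj; omega)]
    rw [pv_foldl_mod_zero, pv_foldl_mod_zero]
    -- rewrite the two sums into the pvDpl form
    have hsum1 : pvSumIf (List.range (k+1))
        (fun j => PySem.Int.bxor (px.getD (k+1) 0) (px.getD j 0) == t1)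
        (fun j => (pvArr nums t1 t2 k (·.2)).getD j 0) =
      pvSumIf (List.range (k+1))
        (fun j => pvPx nums j == PySem.Int.bxor (pvPx nums (k+1)) t1)
        (fun j => ((pvDpl nums t1 t2 k).getD j (0,0)).2) := by
      rw [pvSumIf_congr _ _ (fun j => pvPx nums j == PySem.Int.bxor (pvPx nums (k+1)) t1)]
      · apply pvSumIf_congr_f
        intro j hj _
        simp only [List.mem_range] at hj
        simp only [pvArr]
        rw [PySem.List.getD_map_range (h := by omega), if_pos (by omega)]
      · intro j hj
        simp only [List.mem_range] at hj
        rw [hpxd (k+1) (by omega), hpxd j (by omega)]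
        rw [Bool.eq_iff_iff]
        simp only [beq_iff_eq]
        exact pv_bxor_eq_iff _ _ _
    have hsum2 : pvSumIf (List.range (k+1))
        (fun j => !(PySem.Int.bxor (px.getD (k+1) 0) (px.getD j 0) == t1) &&
                  (PySem.Int.bxor (px.getD (k+1) 0) (px.getD j 0) == t2))
        (fun j => (pvArr nums t1 t2 k (·.1)).getD j 0) =
      pvSumIf (List.range (k+1))
        (fun j => !(pvPx nums j == PySem.Int.bxor (pvPx nums (k+1)) t1) &&
                  (pvPx nums j == PySem.Int.bxor (pvPx nums (k+1)) t2))
        (fun j => ((pvDpl nums t1 t2 k).getD j (0,0)).1) := by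
      rw [pvSumIf_congr _ _ (fun j => !(pvPx nums j == PySem.Int.bxor (pvPx nums (k+1)) t1) &&
                  (pvPx nums j == PySem.Int.bxor (pvPx nums (k+1)) t2))]
      · apply pvSumIf_congr_f
        intro j hj _
        simp only [List.mem_range] at hj
        simp only [pvArr]
        rw [PySem.List.getD_map_range (h := by omega), if_pos (by omega)]
      · intro j hj
        simp only [List.mem_range] at hj
        rw [hpxd (k+1) (by omega), hpxd j (by omega)]
        rw [Bool.eq_iff_iff]
        simp only [Bool.and_eq_true, Bool.not_eq_eq_eq_not, Bool.not_true, beq_iff_eq,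
          beq_eq_false_iff_ne, ne_eq]
        rw [pv_bxor_eq_iff _ _ t1, pv_bxor_eq_iff _ _ t2]
    rw [hsum1, hsum2]
    -- the updated arrays are pvArr (k+1)
    refine Prod.ext ?_ ?_
    · show _ = pvArr nums t1 t2 (k+1) (·.1)
      apply List.ext_getElem (by simp [pvArr])
      intro idx h1 h2
      simp only [pvArr, List.getElem_set, List.getElem_map, List.getElem_range]
      simp only [List.length_map, List.length_range, pvArr] at h2
      by_cases he : k + 1 = idx
      · subst he
        rw [if_pos rfl, if_pos (by omega)]
        have := pvDpl_getD_last nums t1 t2 k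
        rw [this]
      · rw [if_neg he]
        by_cases hle : idx ≤ k
        · rw [if_pos hle, if_pos (by omega), pvDpl_getD_le nums t1 t2 k idx hle]
        · rw [if_neg hle, if_neg (by omega)]
    · show _ = pvArr nums t1 t2 (k+1) (·.2)
      apply List.ext_getElem (by simp [pvArr])
      intro idx h1 h2
      simp only [pvArr, List.getElem_set, List.getElem_map, List.getElem_range]
      simp only [List.length_map, List.length_range, pvArr] at h2
      by_cases he : k + 1 = idx
      · subst he
        rw [if_pos rfl, if_pos (by omega)]
        have := pvDpl_getD_last nums t1 t2 k
        rw [this]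
      · rw [if_neg he]
        by_cases hle : idx ≤ k
        · rw [if_pos hle, if_pos (by omega), pvDpl_getD_le nums t1 t2 k idx hle]
        · rw [if_neg hle, if_neg (by omega)]

theorem pvA_eq (nums : List Int) (t1 t2 : Int) :
    solution_function_name nums t1 t2 = ((pvDpl nums t1 t2 nums.length).getD nums.length (0,0)).1 := by
  unfold solution_function_name
  simp only [show (1000000007 : Int) = pvM from rfl]
  rw [pv_prefix_fold nums nums.length le_rfl]
  rw [pv_outerA nums t1 t2 _ rfl nums.length le_rfl]
  simp only [pvArr]
  rw [PySem.List.getD_map_range (h := by omega), if_pos le_rfl]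

def pvS (nums : List Int) (t1 t2 : Int) (k : Nat) (sel : Int × Int → Int) (y : Int) : Int :=
  (pvSumIf (List.range (k+1)) (fun j => pvPx nums j == y)
    (fun j => sel ((pvDpl nums t1 t2 k).getD j (0,0)))) % pvM

def pvStepB (t1 t2 : Int) (st : Int × PySem.Dict Int Int × PySem.Dict Int Int × Int)
    (v : Int) : Int × PySem.Dict Int Int × PySem.Dict Int Int × Int :=
  let x := PySem.Int.bxor st.1 v
  let s1 := st.2.1
  let s2 := st.2.2.1
  let d1 := s2.getD (PySem.Int.bxor x t1) 0
  let d2 := if t1 == t2 then 0 else s1.getD (PySem.Int.bxor x t2) 0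
  (x, s1.insert x ((s1.getD x 0 + d1) % pvM), s2.insert x ((s2.getD x 0 + d2) % pvM), d1)

def pvFoldB (nums : List Int) (t1 t2 : Int) (k : Nat) :
    Int × PySem.Dict Int Int × PySem.Dict Int Int × Int :=
  (nums.take k).foldl (pvStepB t1 t2) (0, PySem.Dict.ofList [(0, 1)], PySem.Dict.empty, 1)

theorem pv_outerB (nums : List Int) (t1 t2 : Int) :
    ∀ k, k ≤ nums.length →
      (pvFoldB nums t1 t2 k).1 = pvPx nums k ∧
      (∀ y, (pvFoldB nums t1 t2 k).2.1.getD y 0 = pvS nums t1 t2 k (·.1) y) ∧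
      (∀ y, (pvFoldB nums t1 t2 k).2.2.1.getD y 0 = pvS nums t1 t2 k (·.2) y) ∧
      (pvFoldB nums t1 t2 k).2.2.2 = ((pvDpl nums t1 t2 k).getD k (0,0)).1 := by
  intro k
  induction k with
  | zero =>
    intro _
    refine ⟨rfl, ?_, ?_, rfl⟩
    · intro y
      show (PySem.Dict.empty.insert 0 1).getD y 0 = _
      rw [PySem.Dict.getD_insert]
      unfold pvS pvSumIf
      simp only [List.range_one, List.map_cons, List.map_nil, List.sum_cons, List.sum_nil]
      show _ = ((if ((0:Int) == y) then ((1:Int),(0:Int)).1 else 0) + 0) % pvM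
      by_cases hy : y = (0:Int)
      · subst hy; rw [if_pos rfl]; decide
      · rw [if_neg hy, if_neg (by simpa using (Ne.symm hy)), PySem.Dict.getD_empty]; decide
    · intro y
      show (PySem.Dict.empty : PySem.Dict Int Int).getD y 0 = _
      rw [PySem.Dict.getD_empty]
      unfold pvS pvSumIf
      simp only [List.range_one, List.map_cons, List.map_nil, List.sum_cons, List.sum_nil]
      show _ = ((if ((0:Int) == y) then ((1:Int),(0:Int)).2 else 0) + 0) % pvM
      by_cases hy : ((0:Int) == y)
      · rw [if_pos hy]; decide
      · rw [if_neg hy]; decide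
  | succ k ih =>
    intro hk
    have hkl : k < nums.length := by omega
    obtain ⟨h1, h2, h3, h4⟩ := ih (by omega)
    have hstep : pvFoldB nums t1 t2 (k+1) = pvStepB t1 t2 (pvFoldB nums t1 t2 k) nums[k] := by
      unfold pvFoldB
      rw [List.take_succ, List.getElem?_eq_getElem hkl, Option.toList_some,
        List.foldl_append, List.foldl_cons, List.foldl_nil]
    have hx : PySem.Int.bxor (pvFoldB nums t1 t2 k).1 nums[k] = pvPx nums (k+1) := by
      rw [h1, pvPx_succ nums k hkl]
      congr 1
      simp [List.getD_eq_getElem?_getD, List.getElem?_eq_getElem hkl]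
    -- the new dp1 value
    have hd1 : (pvFoldB nums t1 t2 k).2.2.1.getD (PySem.Int.bxor (pvPx nums (k+1)) t1) 0 =
        ((pvDpl nums t1 t2 (k+1)).getD (k+1) (0,0)).1 := by
      rw [h3, pvDpl_getD_last]
      rfl
    -- the new dp2 value
    have hd2 : (if t1 == t2 then 0 else
        (pvFoldB nums t1 t2 k).2.1.getD (PySem.Int.bxor (pvPx nums (k+1)) t2) 0) =
        ((pvDpl nums t1 t2 (k+1)).getD (k+1) (0,0)).2 := by
      rw [pvDpl_getD_last]
      by_cases ht : t1 = t2
      · rw [if_pos (by simpa using ht)]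
        show (0:Int) = _ % pvM
        rw [pvSumIf_zero]
        · decide
        · intro j _
          subst ht
          simp
      · rw [if_neg (by simpa using ht), h2]
        show _ % pvM = _ % pvM
        congr 1
        apply pvSumIf_congr
        intro j _
        rcases Bool.eq_false_or_eq_true (pvPx nums j == PySem.Int.bxor (pvPx nums (k+1)) t2)
          with hj | hj
        · simp only [hj, Bool.and_true]
          rw [beq_iff_eq] at hj
          have hne : ¬ (pvPx nums j == PySem.Int.bxor (pvPx nums (k+1)) t1) = true := by
            simp only [beq_iff_eq, hj]
            intro hcontra
            exact ht (by
              have := congrArg (PySem.Int.bxor (pvPx nums (k+1))) hcontra.symm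
              rwa [pv_bxor_cancel, pv_bxor_cancel] at this)
          simp [Bool.eq_false_iff.mpr hne]
        · simp [hj]
    -- decomposition of the updated running sums
    have hS : ∀ (sel : Int × Int → Int) (y : Int), pvS nums t1 t2 (k+1) sel y =
        (pvSumIf (List.range (k+1)) (fun j => pvPx nums j == y)
            (fun j => sel ((pvDpl nums t1 t2 k).getD j (0,0))) +
          (if pvPx nums (k+1) == y then sel ((pvDpl nums t1 t2 (k+1)).getD (k+1) (0,0)) else 0)) %
          pvM := by
      intro sel y
      unfold pvS
      rw [List.range_succ (n := k+1), pvSumIf_append]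
      congr 1
      congr 1
      · apply pvSumIf_congr_f
        intro j hj _
        simp only [List.mem_range] at hj
        rw [pvDpl_getD_le nums t1 t2 k j (by omega)]
      · simp [pvSumIf]
    refine ⟨by rw [hstep]; exact hx, ?_, ?_, ?_⟩
    · intro y
      rw [hstep]
      show ((pvFoldB nums t1 t2 k).2.1.insert _ _).getD y 0 = _
      rw [PySem.Dict.getD_insert, hS (·.1) y]
      by_cases hy : y = pvPx nums (k+1)
      · subst hy
        rw [hx, if_pos rfl, if_pos (by simp), h2, hd1]
        unfold pvS
        rw [Int.emod_add_emod]
      · rw [hx, if_neg hy, if_neg (by simpa using (fun h => hy h.symm)), h2]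
        unfold pvS
        rw [add_zero]
    · intro y
      rw [hstep]
      show ((pvFoldB nums t1 t2 k).2.2.1.insert _ _).getD y 0 = _
      rw [PySem.Dict.getD_insert, hS (·.2) y]
      by_cases hy : y = pvPx nums (k+1)
      · subst hy
        rw [hx, if_pos rfl, hd2, if_pos (by simp), h3]
        unfold pvS
        rw [Int.emod_add_emod]
      · rw [hx, if_neg hy, if_neg (by simpa using (fun h => hy h.symm)), h3]
        unfold pvS
        rw [add_zero]
    · rw [hstep]
      show (pvFoldB nums t1 t2 k).2.2.1.getD _ 0 = _
      rw [hx]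
      exact hd1

theorem pvB_eq (nums : List Int) (t1 t2 : Int) :
    solution_function_name_alt nums t1 t2 = ((pvDpl nums t1 t2 nums.length).getD nums.length (0,0)).1 := by
  have h := (pv_outerB nums t1 t2 nums.length le_rfl).2.2.2
  unfold pvFoldB at h
  rw [List.take_length] at h
  exact h


-- ===== VERDICT (by name: the statement is the Claim_ definition above) =====
theorem solution_function_name_spec : Claim_equal_solution_function_name := by
  intro nums t1 t2 _
  unfold Spec_solution_function_name
  rw [pvA_eq, pvB_eq]
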